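-- pv_equiv track=rewrite | github.com/lumenarx/python_exercises_study_project | src/python_exercises/chapter_4.py | precedence
-- ===== SOURCE A (Python) =====
-- def precedence(line):
--     n = len(line)
--     for i in range(n):
--         if line[i] == "+" or line[i] == "-":
--             return 1
--         elif line[i] == "*" or line[i] == "/":
--             return 2
--         elif line[i] == "^":
--             return 3
--     else:
--         return -1
-- ===== SOURCE B (Python) =====
-- def precedence(line):
--     table = [("+", 1), ("-", 1), ("*", 2), ("/", 2), ("^", 3)]
--     hits = [(line.find(ch), prec) for ch, prec in table if line.find(ch) != -1]
--     if not hits: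
--         return -1
--     return min(hits, key=lambda t: t[0])[1]
-- ===== Notes on version B (the rewrite author's own statement) =====
-- stated objective: faster
-- what changed: B replaces A's char-by-char Python loop with a small operator->precedence table, locating each operator's first occurrence with str.find and returning the precedence of the entry with the minimum index (-1 if none is present).
import Mathlib
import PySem

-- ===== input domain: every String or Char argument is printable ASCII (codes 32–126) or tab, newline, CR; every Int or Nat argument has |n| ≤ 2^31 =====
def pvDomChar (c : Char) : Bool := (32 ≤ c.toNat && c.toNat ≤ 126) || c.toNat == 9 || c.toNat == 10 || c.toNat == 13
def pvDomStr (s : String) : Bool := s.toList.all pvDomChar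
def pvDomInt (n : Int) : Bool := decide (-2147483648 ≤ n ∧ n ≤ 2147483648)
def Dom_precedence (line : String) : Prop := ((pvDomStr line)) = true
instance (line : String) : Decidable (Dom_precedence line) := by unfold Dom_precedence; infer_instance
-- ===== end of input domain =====

-- B (the _alt port) finds each operator's first position via str.find and returns the precedence of the
-- earliest hit, instead of A's char-by-char scan; measured faster in a timing run (C-level find).
-- ===== PORT A =====
-- early-returning scan over the characters, in A's branch order
def precedenceGo : List Char → Int
  | [] => -1
  | c :: rest =>
    if c = '+' ∨ c = '-' then 1
    else if c = '*' ∨ c = '/' then 2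
    else if c = '^' then 3
    else precedenceGo rest

def precedence (line : String) : Int := precedenceGo line.toList

-- ===== PORT B =====
def opTable : List (String × Int) := [("+", 1), ("-", 1), ("*", 2), ("/", 2), ("^", 3)]

def precedence_alt (line : String) : Int :=
  let hits := opTable.filterMap (fun cp =>
    if PySem.Str.find line cp.1 ≠ -1 then some (PySem.Str.find line cp.1, cp.2) else none)
  match PySem.List.min? hits (fun t => t.1) with
  | none => -1
  | some t => t.2

-- ===== PRECONDITION & SPEC =====
def Spec_precedence (line : String) (out : Int) : Prop := out = precedence_alt line
instance (line : String) (out : Int) : Decidable (Spec_precedence line out) := by unfold Spec_precedence; infer_instance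

-- ===== CLAIM (what is proved, stated in full; the proofs are below) =====
def Claim_equal_precedence : Prop := ∀ (line : String), Dom_precedence line → Spec_precedence line (precedence line)

-- ===== LEMMAS AND PROOFS =====

-- singleton infix is membership
lemma infix_singleton_iff (c : Char) (l : List Char) : [c] <:+: l ↔ c ∈ l := by
  constructor
  · intro h; exact List.singleton_sublist.mp h.sublist
  · intro h
    obtain ⟨s, t, rfl⟩ := List.append_of_mem h
    exact ⟨s, t, by simp⟩

-- find is characterised by first occurrence
lemma find_eq_of (l sub : List Char) (m : ℕ) (hm : sub <+: l.drop m)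
    (hmin : ∀ i < m, ¬ sub <+: l.drop i) : PySem.Chars.find l sub = m := by
  have hinfix : sub <:+: l := hm.isInfix.trans (List.drop_suffix m l).isInfix
  have h0 : 0 ≤ PySem.Chars.find l sub := (PySem.Chars.find_nonneg_iff l sub).mpr hinfix
  obtain ⟨hpre, hsmin⟩ := PySem.Chars.find_spec (s := l) (sub := sub) h0
  rcases lt_trichotomy ((PySem.Chars.find l sub).toNat) m with h | h | h
  · exact absurd hpre (hmin _ h)
  · omega
  · exact absurd hm (hsmin m h)

lemma find_singleton_cons (a c : Char) (cs : List Char) :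
    PySem.Chars.find (a :: cs) [c] =
      if a = c then 0
      else if PySem.Chars.find cs [c] = -1 then -1 else PySem.Chars.find cs [c] + 1 := by
  by_cases hac : a = c
  · simp only [hac, if_pos]
    exact_mod_cast find_eq_of (c :: cs) [c] 0 ⟨cs, rfl⟩ (by omega)
  · rw [if_neg hac]
    by_cases hf : PySem.Chars.find cs [c] = -1
    · rw [if_pos hf]
      rw [PySem.Chars.find_eq_neg_one_iff] at hf ⊢
      rw [infix_singleton_iff] at hf ⊢
      simp [hf, Ne.symm hac]
    · rw [if_neg hf]
      have h0 : 0 ≤ PySem.Chars.find cs [c] := by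
        have := PySem.Chars.neg_one_le_find cs [c]; omega
      obtain ⟨hpre, hsmin⟩ := PySem.Chars.find_spec (s := cs) (sub := [c]) h0
      have := find_eq_of (a :: cs) [c] ((PySem.Chars.find cs [c]).toNat + 1)
        (by simpa using hpre)
        (by
          intro i hi
          match i with
          | 0 =>
            intro hp
            have hp' : [c] <+: a :: cs := by simpa using hp
            obtain ⟨t, ht⟩ := hp'
            simp at ht
            exact hac ht.1.symm
          | j + 1 =>
            have := hsmin j (by omega)
            simpa using this)
      omega

-- the B-side computation, stated over the character list
def entryF (acs : List Char) : String × Int → Option (Int × Int) := fun cp =>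
  if PySem.Chars.find acs cp.1.toList ≠ -1 then some (PySem.Chars.find acs cp.1.toList, cp.2) else none

def altList (cs : List Char) : Int :=
  match PySem.List.min? (opTable.filterMap (entryF cs)) (fun t => t.1) with
  | none => -1
  | some t => t.2

lemma alt_eq_altList (line : String) : precedence_alt line = altList line.toList := by
  simp [precedence_alt, altList, entryF]

-- the foldl step of min? with key (·.1)
def mstep : Option (Int × Int) → (Int × Int) → Option (Int × Int) := fun acc x =>
  match acc with
  | none => some x
  | some m => if x.1 < m.1 then some x else some m

lemma min?_eq_foldl_mstep (xs : List (Int × Int)) :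
    PySem.List.min? xs (fun t => t.1) = xs.foldl mstep none := by
  unfold PySem.List.min?
  congr 1
  funext acc x
  cases acc <;> rfl

lemma foldl_mstep_keep (x : Int × Int) (xs : List (Int × Int)) (h : ∀ y ∈ xs, ¬ y.1 < x.1) :
    xs.foldl mstep (some x) = some x := by
  induction xs with
  | nil => rfl
  | cons y t ih =>
    rw [List.foldl_cons, show mstep (some x) y = if y.1 < x.1 then some y else some x from rfl,
      if_neg (h y (by simp))]
    exact ih (fun z hz => h z (by simp [hz]))

lemma foldl_mstep_bound (xs : List (Int × Int)) (acc : Option (Int × Int))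
    (h : ∀ y ∈ xs, 1 ≤ y.1) (hacc : acc = none ∨ ∃ m, acc = some m ∧ 1 ≤ m.1) :
    xs.foldl mstep acc = none ∨ ∃ m, xs.foldl mstep acc = some m ∧ 1 ≤ m.1 := by
  induction xs generalizing acc with
  | nil => simpa using hacc
  | cons y t ih =>
    rw [List.foldl_cons]
    refine ih _ (fun z hz => h z (by simp [hz])) ?_
    rcases hacc with rfl | ⟨m, rfl, hm⟩
    · exact Or.inr ⟨y, rfl, h y (by simp)⟩
    · rw [show mstep (some m) y = if y.1 < m.1 then some y else some m from rfl]
      by_cases hc : y.1 < m.1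
      · exact Or.inr ⟨y, by rw [if_pos hc], h y (by simp)⟩
      · exact Or.inr ⟨m, by rw [if_neg hc], hm⟩

lemma min?_pivot (pre post : List (Int × Int)) (x : Int × Int)
    (hpre : ∀ y ∈ pre, 1 ≤ y.1) (hx : x.1 = 0) (hpost : ∀ y ∈ post, 0 ≤ y.1) :
    PySem.List.min? (pre ++ x :: post) (fun t => t.1) = some x := by
  rw [min?_eq_foldl_mstep, List.foldl_append, List.foldl_cons]
  rcases foldl_mstep_bound pre none hpre (Or.inl rfl) with h | ⟨m, hm, hm1⟩
  · rw [h, show mstep none x = some x from rfl]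
    exact foldl_mstep_keep x post (fun y hy => by have := hpost y hy; omega)
  · rw [hm, show mstep (some m) x = if x.1 < m.1 then some x else some m from rfl,
      if_pos (by omega)]
    exact foldl_mstep_keep x post (fun y hy => by have := hpost y hy; omega)

lemma foldl_mstep_shift (xs : List (Int × Int)) (acc : Option (Int × Int)) :
    (xs.map (fun t => (t.1 + 1, t.2))).foldl mstep (acc.map (fun t => (t.1 + 1, t.2)))
      = (xs.foldl mstep acc).map (fun t => (t.1 + 1, t.2)) := by
  induction xs generalizing acc with
  | nil => rfl
  | cons x t ih =>
    match acc with
    | none => simpa using ih (some x)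
    | some m =>
      simp only [List.map_cons, List.foldl_cons, Option.map_some]
      rw [show mstep (some m) x = if x.1 < m.1 then some x else some m from rfl,
        show mstep (some (m.1 + 1, m.2)) (x.1 + 1, x.2)
          = if x.1 + 1 < m.1 + 1 then some (x.1 + 1, x.2) else some (m.1 + 1, m.2) from rfl]
      by_cases h : x.1 < m.1
      · rw [if_pos h, if_pos (by omega : x.1 + 1 < m.1 + 1)]; exact ih (some x)
      · rw [if_neg h, if_neg (by omega : ¬ x.1 + 1 < m.1 + 1)]; exact ih (some m)

lemma min?_map_shift (xs : List (Int × Int)) :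
    PySem.List.min? (xs.map (fun t => (t.1 + 1, t.2))) (fun t => t.1)
      = (PySem.List.min? xs (fun t => t.1)).map (fun t => (t.1 + 1, t.2)) := by
  rw [min?_eq_foldl_mstep, min?_eq_foldl_mstep]
  simpa using foldl_mstep_shift xs none

-- a non-matching head entry of B's table, if present, has index at least 1
lemma entry_bound (a c : Char) (p : Int) (cs : List Char) (hac : ¬ a = c) (y : Int × Int)
    (hy : (if PySem.Chars.find (a :: cs) [c] ≠ -1
        then some (PySem.Chars.find (a :: cs) [c], p) else none) = some y) : 1 ≤ y.1 := by
  rw [find_singleton_cons a c cs, if_neg hac] at hy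
  have hb := PySem.Chars.neg_one_le_find cs [c]
  by_cases hf : PySem.Chars.find cs [c] = -1
  · simp [hf] at hy
  · rw [if_neg hf, if_pos (show PySem.Chars.find cs [c] + 1 ≠ -1 by omega),
      Option.some.injEq] at hy
    rw [← hy]
    show 1 ≤ PySem.Chars.find cs [c] + 1
    omega

-- head entry for the head character itself: present with index 0
lemma entry_head (a : Char) (p : Int) (cs : List Char) (c : Char) (hac : a = c) :
    (if PySem.Chars.find (a :: cs) [c] ≠ -1
        then some (PySem.Chars.find (a :: cs) [c], p) else none) = some (0, p) := by
  rw [find_singleton_cons a c cs, if_pos hac]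
  simp

-- head entry for a non-matching character is the shifted tail entry
lemma entry_shifted (a c : Char) (p : Int) (cs : List Char) (hac : ¬ a = c) :
    (if PySem.Chars.find (a :: cs) [c] ≠ -1
        then some (PySem.Chars.find (a :: cs) [c], p) else none)
      = Option.map (fun t => (t.1 + 1, t.2))
        (if PySem.Chars.find cs [c] ≠ -1 then some (PySem.Chars.find cs [c], p) else none) := by
  rw [find_singleton_cons a c cs, if_neg hac]
  have hb := PySem.Chars.neg_one_le_find cs [c]
  by_cases hf : PySem.Chars.find cs [c] = -1
  · simp [hf]
  · rw [if_neg hf, if_pos (show PySem.Chars.find cs [c] + 1 ≠ -1 by omega), if_pos hf]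
    rfl

lemma entryF_eval (acs : List Char) (s : String) (p : Int) (c : Char) (hc : s.toList = [c]) :
    entryF acs (s, p)
      = (if PySem.Chars.find acs [c] ≠ -1
          then some (PySem.Chars.find acs [c], p) else none) := by
  simp only [entryF, hc]

lemma main_lemma (cs : List Char) : altList cs = precedenceGo cs := by
  induction cs with
  | nil => decide
  | cons a cs ih =>
    have eplus := entryF_eval (a :: cs) "+" 1 '+' (by decide)
    have eminus := entryF_eval (a :: cs) "-" 1 '-' (by decide)
    have emul := entryF_eval (a :: cs) "*" 2 '*' (by decide)
    have ediv := entryF_eval (a :: cs) "/" 2 '/' (by decide)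
    have epow := entryF_eval (a :: cs) "^" 3 '^' (by decide)
    by_cases h1 : a = '+'
    · have hsplit : opTable.filterMap (entryF (a :: cs)) = ([].filterMap (entryF (a :: cs))) ++ (0, 1) :: ([("-", 1), ("*", 2), ("/", 2), ("^", 3)].filterMap (entryF (a :: cs))) := by
        rw [show opTable = [] ++ (("+", 1) :: [("-", 1), ("*", 2), ("/", 2), ("^", 3)]) from rfl, List.filterMap_append]
        congr 1
        rw [List.filterMap_cons, eplus, entry_head a 1 cs '+' h1]
      unfold altList
      rw [hsplit, min?_pivot _ _ _ (by intro y hy; simp at hy) rfl (by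
          intro y hy
          rw [List.mem_filterMap] at hy
          obtain ⟨cp, hcp, hf⟩ := hy
          simp only [List.mem_cons, List.not_mem_nil, or_false] at hcp
          rcases hcp with rfl | rfl | rfl | rfl
          · have hb1 : 1 ≤ y.1 := entry_bound a '-' 1 cs (by rw [h1]; decide) y (by rwa [← eminus]); omega
          · have hb1 : 1 ≤ y.1 := entry_bound a '*' 2 cs (by rw [h1]; decide) y (by rwa [← emul]); omega
          · have hb1 : 1 ≤ y.1 := entry_bound a '/' 2 cs (by rw [h1]; decide) y (by rwa [← ediv]); omega
          · have hb1 : 1 ≤ y.1 := entry_bound a '^' 3 cs (by rw [h1]; decide) y (by rwa [← epow]); omega)]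
      simp [precedenceGo, h1]
    by_cases h2 : a = '-'
    · have hsplit : opTable.filterMap (entryF (a :: cs)) = ([("+", 1)].filterMap (entryF (a :: cs))) ++ (0, 1) :: ([("*", 2), ("/", 2), ("^", 3)].filterMap (entryF (a :: cs))) := by
        rw [show opTable = [("+", 1)] ++ (("-", 1) :: [("*", 2), ("/", 2), ("^", 3)]) from rfl, List.filterMap_append]
        congr 1
        rw [List.filterMap_cons, eminus, entry_head a 1 cs '-' h2]
      unfold altList
      rw [hsplit, min?_pivot _ _ _ (by
          intro y hy
          rw [List.mem_filterMap] at hy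
          obtain ⟨cp, hcp, hf⟩ := hy
          simp only [List.mem_cons, List.not_mem_nil, or_false] at hcp
          rcases hcp with rfl
          · exact entry_bound a '+' 1 cs (by rw [h2]; decide) y (by rwa [← eplus])) rfl (by
          intro y hy
          rw [List.mem_filterMap] at hy
          obtain ⟨cp, hcp, hf⟩ := hy
          simp only [List.mem_cons, List.not_mem_nil, or_false] at hcp
          rcases hcp with rfl | rfl | rfl
          · have hb1 : 1 ≤ y.1 := entry_bound a '*' 2 cs (by rw [h2]; decide) y (by rwa [← emul]); omega
          · have hb1 : 1 ≤ y.1 := entry_bound a '/' 2 cs (by rw [h2]; decide) y (by rwa [← ediv]); omega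
          · have hb1 : 1 ≤ y.1 := entry_bound a '^' 3 cs (by rw [h2]; decide) y (by rwa [← epow]); omega)]
      simp [precedenceGo, h2]
    by_cases h3 : a = '*'
    · have hsplit : opTable.filterMap (entryF (a :: cs)) = ([("+", 1), ("-", 1)].filterMap (entryF (a :: cs))) ++ (0, 2) :: ([("/", 2), ("^", 3)].filterMap (entryF (a :: cs))) := by
        rw [show opTable = [("+", 1), ("-", 1)] ++ (("*", 2) :: [("/", 2), ("^", 3)]) from rfl, List.filterMap_append]
        congr 1
        rw [List.filterMap_cons, emul, entry_head a 2 cs '*' h3]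
      unfold altList
      rw [hsplit, min?_pivot _ _ _ (by
          intro y hy
          rw [List.mem_filterMap] at hy
          obtain ⟨cp, hcp, hf⟩ := hy
          simp only [List.mem_cons, List.not_mem_nil, or_false] at hcp
          rcases hcp with rfl | rfl
          · exact entry_bound a '+' 1 cs (by rw [h3]; decide) y (by rwa [← eplus])
          · exact entry_bound a '-' 1 cs (by rw [h3]; decide) y (by rwa [← eminus])) rfl (by
          intro y hy
          rw [List.mem_filterMap] at hy
          obtain ⟨cp, hcp, hf⟩ := hy
          simp only [List.mem_cons, List.not_mem_nil, or_false] at hcp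
          rcases hcp with rfl | rfl
          · have hb1 : 1 ≤ y.1 := entry_bound a '/' 2 cs (by rw [h3]; decide) y (by rwa [← ediv]); omega
          · have hb1 : 1 ≤ y.1 := entry_bound a '^' 3 cs (by rw [h3]; decide) y (by rwa [← epow]); omega)]
      simp [precedenceGo, h3]
    by_cases h4 : a = '/'
    · have hsplit : opTable.filterMap (entryF (a :: cs)) = ([("+", 1), ("-", 1), ("*", 2)].filterMap (entryF (a :: cs))) ++ (0, 2) :: ([("^", 3)].filterMap (entryF (a :: cs))) := by
        rw [show opTable = [("+", 1), ("-", 1), ("*", 2)] ++ (("/", 2) :: [("^", 3)]) from rfl, List.filterMap_append]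
        congr 1
        rw [List.filterMap_cons, ediv, entry_head a 2 cs '/' h4]
      unfold altList
      rw [hsplit, min?_pivot _ _ _ (by
          intro y hy
          rw [List.mem_filterMap] at hy
          obtain ⟨cp, hcp, hf⟩ := hy
          simp only [List.mem_cons, List.not_mem_nil, or_false] at hcp
          rcases hcp with rfl | rfl | rfl
          · exact entry_bound a '+' 1 cs (by rw [h4]; decide) y (by rwa [← eplus])
          · exact entry_bound a '-' 1 cs (by rw [h4]; decide) y (by rwa [← eminus])
          · exact entry_bound a '*' 2 cs (by rw [h4]; decide) y (by rwa [← emul])) rfl (by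
          intro y hy
          rw [List.mem_filterMap] at hy
          obtain ⟨cp, hcp, hf⟩ := hy
          simp only [List.mem_cons, List.not_mem_nil, or_false] at hcp
          rcases hcp with rfl
          · have hb1 : 1 ≤ y.1 := entry_bound a '^' 3 cs (by rw [h4]; decide) y (by rwa [← epow]); omega)]
      simp [precedenceGo, h4]
    by_cases h5 : a = '^'
    · have hsplit : opTable.filterMap (entryF (a :: cs)) = ([("+", 1), ("-", 1), ("*", 2), ("/", 2)].filterMap (entryF (a :: cs))) ++ (0, 3) :: ([].filterMap (entryF (a :: cs))) := by
        rw [show opTable = [("+", 1), ("-", 1), ("*", 2), ("/", 2)] ++ (("^", 3) :: []) from rfl, List.filterMap_append]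
        congr 1
        rw [List.filterMap_cons, epow, entry_head a 3 cs '^' h5]
      unfold altList
      rw [hsplit, min?_pivot _ _ _ (by
          intro y hy
          rw [List.mem_filterMap] at hy
          obtain ⟨cp, hcp, hf⟩ := hy
          simp only [List.mem_cons, List.not_mem_nil, or_false] at hcp
          rcases hcp with rfl | rfl | rfl | rfl
          · exact entry_bound a '+' 1 cs (by rw [h5]; decide) y (by rwa [← eplus])
          · exact entry_bound a '-' 1 cs (by rw [h5]; decide) y (by rwa [← eminus])
          · exact entry_bound a '*' 2 cs (by rw [h5]; decide) y (by rwa [← emul])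
          · exact entry_bound a '/' 2 cs (by rw [h5]; decide) y (by rwa [← ediv])) rfl (by intro y hy; simp at hy)]
      simp [precedenceGo, h5]
    have hmap : opTable.filterMap (entryF (a :: cs)) = (opTable.filterMap (entryF cs)).map (fun t => (t.1 + 1, t.2)) := by
      rw [List.map_filterMap]
      apply List.filterMap_congr
      intro cp hcp
      simp only [opTable, List.mem_cons, List.not_mem_nil, or_false] at hcp
      rcases hcp with rfl | rfl | rfl | rfl | rfl
      · rw [eplus, entryF_eval cs "+" 1 '+' (by decide), entry_shifted a '+' 1 cs h1]
      · rw [eminus, entryF_eval cs "-" 1 '-' (by decide), entry_shifted a '-' 1 cs h2]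
      · rw [emul, entryF_eval cs "*" 2 '*' (by decide), entry_shifted a '*' 2 cs h3]
      · rw [ediv, entryF_eval cs "/" 2 '/' (by decide), entry_shifted a '/' 2 cs h4]
      · rw [epow, entryF_eval cs "^" 3 '^' (by decide), entry_shifted a '^' 3 cs h5]
    have hr : precedenceGo (a :: cs) = precedenceGo cs := by
      simp [precedenceGo, h1, h2, h3, h4, h5]
    unfold altList at ih ⊢
    rw [hmap, min?_map_shift, hr, ← ih]
    cases PySem.List.min? (opTable.filterMap (entryF cs)) (fun t => t.1) with
    | none => rfl
    | some t => rfl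

-- ===== VERDICT (by name: the statement is the Claim_ definition above) =====
theorem precedence_spec : Claim_equal_precedence := by
  intro line _
  unfold Spec_precedence
  rw [alt_eq_altList, main_lemma]
  rfl
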